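-- pv_equiv track=rewrite | github.com/JetBrains-Research/washu | downstream/bed_metrics.py | color_annotator_age
-- ===== SOURCE A (Python) =====
-- from typing import List, Tuple
--
-- def color_annotator_age(label) -> Tuple[Tuple[str, str]]:
--     chunks = [ch.lower() for ch in label.split("_")]
--
--     for ch in chunks:
--         if ch.startswith("od"):
--             return (("age", "b"),)
--         elif ch.startswith("yd"):
--             return (("age", "r"),)
--
--     return (("age", "gray"),)
-- ===== SOURCE B (Python) =====
-- import re
--
-- def color_annotator_age(label):
--     m = re.search(r'(?:^|_)(od|yd)', label, re.IGNORECASE)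
--     if m is None:
--         return (("age", "gray"),)
--     return (("age", "b" if m.group(1)[0].lower() == "o" else "r"),)
-- ===== Notes on version B (the rewrite author's own statement) =====
-- stated objective: idiomatic
-- what changed: Replaced the split-into-chunks-then-lowercase-then-scan loop with a single anchored case-insensitive regex search over the original label, inspecting the first character of the leftmost match.
import Mathlib
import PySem

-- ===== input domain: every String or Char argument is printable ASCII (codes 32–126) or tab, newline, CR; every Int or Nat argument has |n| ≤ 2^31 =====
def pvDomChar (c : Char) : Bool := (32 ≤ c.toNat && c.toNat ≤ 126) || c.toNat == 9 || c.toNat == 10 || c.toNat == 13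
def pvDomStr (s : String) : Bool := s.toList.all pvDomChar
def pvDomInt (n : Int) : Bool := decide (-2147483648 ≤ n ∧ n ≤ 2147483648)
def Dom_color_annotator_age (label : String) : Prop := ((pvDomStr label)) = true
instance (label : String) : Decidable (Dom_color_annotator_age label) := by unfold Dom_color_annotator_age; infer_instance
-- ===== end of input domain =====

-- B replaces A's split/lowercase/scan loop by one anchored case-insensitive regex
-- search over the original label (more idiomatic; same cost).

-- ===== PORT A =====
-- the 'for ch in chunks' loop of A
def pvLoopA : List (List Char) → List (String × String)
  | [] => [("age", "gray")]
  | ch :: rest =>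
    if PySem.Chars.startswith ch ['o', 'd'] then [("age", "b")]
    else if PySem.Chars.startswith ch ['y', 'd'] then [("age", "r")]
    else pvLoopA rest

def color_annotator_age (label : String) : List (String × String) :=
  pvLoopA ((PySem.Chars.splitOn label.toList ['_']).map PySem.Chars.lower)

-- ===== PORT B =====
-- re.search(r'(?:^|_)(od|yd)', label, re.IGNORECASE) ported by hand as a leftmost
-- scan over the characters: a position is tried iff it is the start of the string
-- or follows '_', exactly the (?:^|_) anchor; IGNORECASE is lowerChar on both
-- sides (exact on the ASCII domain).  Returns m.group(1)[0].lower() if any.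
-- "the next character (case-folded) is 'd'" — the second letter of the group
def pvIsD : List Char → Bool
  | d :: _ => PySem.Chars.lowerChar d == 'd'
  | [] => false

def pvSearchAge : List Char → Bool → Option Char
  | [], _ => none
  | c :: cs, atStart =>
    if atStart && (PySem.Chars.lowerChar c == 'o' || PySem.Chars.lowerChar c == 'y')
        && pvIsD cs then
      some (PySem.Chars.lowerChar c)
    else
      pvSearchAge cs (c == '_')

def color_annotator_age_alt (label : String) : List (String × String) :=
  match pvSearchAge label.toList true with
  | none => [("age", "gray")]
  | some g => [("age", if g == 'o' then "b" else "r")]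

-- ===== PRECONDITION & SPEC =====
def Spec_color_annotator_age (label : String) (out : List (String × String)) : Prop := out = color_annotator_age_alt label
instance (label : String) (out : List (String × String)) : Decidable (Spec_color_annotator_age label out) := by unfold Spec_color_annotator_age; infer_instance

-- ===== CLAIM (what is proved, stated in full; the proofs are below) =====
def Claim_equal_color_annotator_age : Prop := ∀ (label : String), Dom_color_annotator_age label → Spec_color_annotator_age label (color_annotator_age label)

-- ===== LEMMAS AND PROOFS =====

-- clean structural recursion computing PySem.Chars.splitOn · ['_']
def pvMySplit : List Char → List (List Char)
  | [] => [[]]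
  | c :: rest =>
    if c = '_' then [] :: pvMySplit rest
    else
      match pvMySplit rest with
      | [] => [[c]]        -- unreachable: pvMySplit never returns []
      | x :: xs => (c :: x) :: xs

lemma pvMySplit_ne_nil (l : List Char) : pvMySplit l ≠ [] := by
  cases l with
  | nil => simp [pvMySplit]
  | cons c rest =>
    simp only [pvMySplit]
    split
    · simp
    · split <;> simp

def pvConsFirst (p : List Char) : List (List Char) → List (List Char)
  | [] => [p]
  | x :: xs => (p ++ x) :: xs

lemma pvSplitGo_spec : ∀ (fuel : Nat) (l cur : List Char) (acc : List (List Char)),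
    l.length < fuel →
    PySem.Chars.splitOn.go ['_'] fuel l cur acc
      = acc.reverse ++ pvConsFirst cur.reverse (pvMySplit l) := by
  intro fuel
  induction fuel with
  | zero => intro l cur acc h; omega
  | succ fuel ih =>
    intro l cur acc h
    cases l with
    | nil =>
      simp [PySem.Chars.splitOn.go, pvMySplit, pvConsFirst]
    | cons c rest =>
      by_cases hc : c = '_'
      · subst hc
        have hpre : List.isPrefixOf ['_'] ('_' :: rest) = true := by
          simp [List.isPrefixOf]
        rw [PySem.Chars.splitOn.go, if_pos hpre]
        have := ih rest [] (cur.reverse :: acc) (by simpa using Nat.lt_of_succ_lt_succ h)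
        simp only [List.length_cons, List.length_nil, List.drop_succ_cons,
          List.drop_zero] at this ⊢
        rw [this]
        rcases hms : pvMySplit rest with _ | ⟨x, xs⟩
        · exact absurd hms (pvMySplit_ne_nil rest)
        · simp [pvMySplit, hms, pvConsFirst]
      · have hpre : List.isPrefixOf ['_'] (c :: rest) = false := by
          simp [List.isPrefixOf]
          exact fun h' => (hc h'.symm).elim
        rw [PySem.Chars.splitOn.go, if_neg (by simp [hpre])]
        have := ih rest (c :: cur) acc (by simpa using Nat.lt_of_succ_lt_succ h)
        rw [this]
        rcases hms : pvMySplit rest with _ | ⟨x, xs⟩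
        · exact absurd hms (pvMySplit_ne_nil rest)
        · simp [pvMySplit, hms, hc, pvConsFirst]

lemma pvSplitOn_eq (l : List Char) : PySem.Chars.splitOn l ['_'] = pvMySplit l := by
  rw [PySem.Chars.splitOn, pvSplitGo_spec (l.length + 1) l [] [] (Nat.lt_succ_self _)]
  rcases hms : pvMySplit l with _ | ⟨x, xs⟩
  · exact absurd hms (pvMySplit_ne_nil l)
  · simp [pvConsFirst]

-- the chunk-level scan A performs, producing the group letter B extracts
def pvChunkScan : List (List Char) → Option Char
  | [] => none
  | ch :: rest =>
    if PySem.Chars.startswith (PySem.Chars.lower ch) ['o', 'd'] then some 'o'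
    else if PySem.Chars.startswith (PySem.Chars.lower ch) ['y', 'd'] then some 'y'
    else pvChunkScan rest

def pvAgeOut : Option Char → List (String × String)
  | none => [("age", "gray")]
  | some g => [("age", if g == 'o' then "b" else "r")]

lemma pvLoopA_map (chs : List (List Char)) :
    pvLoopA (chs.map PySem.Chars.lower) = pvAgeOut (pvChunkScan chs) := by
  induction chs with
  | nil => simp [pvLoopA, pvChunkScan, pvAgeOut]
  | cons ch rest ih =>
    simp only [List.map_cons, pvLoopA, pvChunkScan]
    split_ifs with h1 h2 <;> simp [pvAgeOut, ih]

-- the char-level "does the chunk starting here start with [p,'d'] (lowercased)" test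
lemma pvHead_match (c : Char) (cs x : List Char) (xs : List (List Char))
    (h : pvMySplit cs = x :: xs) (p : Char) :
    PySem.Chars.startswith (PySem.Chars.lower (c :: x)) [p, 'd']
      = ((PySem.Chars.lowerChar c == p) && pvIsD cs) := by
  cases cs with
  | nil =>
    simp only [pvMySplit, List.cons.injEq] at h
    obtain ⟨h1, h2⟩ := h
    subst h1
    simp [PySem.Chars.startswith, PySem.Chars.lower, List.isPrefixOf, pvIsD]
  | cons d cs' =>
    by_cases hd : d = '_'
    · subst hd
      simp only [pvMySplit, reduceIte, List.cons.injEq] at h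
      obtain ⟨h1, h2⟩ := h
      subst h1
      have hdl : PySem.Chars.lowerChar '_' = '_' := by decide
      simp [PySem.Chars.startswith, PySem.Chars.lower, List.isPrefixOf, pvIsD, hdl]
    · rcases hms : pvMySplit cs' with _ | ⟨y, ys⟩
      · exact absurd hms (pvMySplit_ne_nil cs')
      · simp only [pvMySplit, if_neg hd, hms, List.cons.injEq] at h
        obtain ⟨h1, h2⟩ := h
        subst h1
        simp only [PySem.Chars.startswith, PySem.Chars.lower, List.map_cons,
          List.isPrefixOf, pvIsD, Bool.and_true]
        rw [Bool.beq_comm (a := p), Bool.beq_comm (a := ('d' : Char))]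

lemma pvScan_eq (l : List Char) :
    pvSearchAge l true = pvChunkScan (pvMySplit l)
      ∧ pvSearchAge l false = pvChunkScan (pvMySplit l).tail := by
  induction l with
  | nil =>
    constructor <;> simp [pvSearchAge, pvMySplit, pvChunkScan, PySem.Chars.startswith,
      PySem.Chars.lower]
  | cons c cs ih =>
    obtain ⟨ih1, ih2⟩ := ih
    by_cases hc : c = '_'
    · subst hc
      have hlow : PySem.Chars.lowerChar '_' = '_' := by decide
      constructor
      · rw [show pvSearchAge ('_' :: cs) true = pvSearchAge cs ('_' == '_') from by
          simp [pvSearchAge, hlow]]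
        simp only [beq_self_eq_true]
        rw [ih1]
        simp [pvMySplit, pvChunkScan, PySem.Chars.startswith, PySem.Chars.lower]
      · rw [show pvSearchAge ('_' :: cs) false = pvSearchAge cs ('_' == '_') from by
          simp [pvSearchAge]]
        simp only [beq_self_eq_true]
        rw [ih1]
        simp [pvMySplit]
    · rcases hms : pvMySplit cs with _ | ⟨x, xs⟩
      · exact absurd hms (pvMySplit_ne_nil cs)
      · have hsplit : pvMySplit (c :: cs) = (c :: x) :: xs := by
          simp [pvMySplit, hms, hc]
        have hcb : (c == '_') = false := by simp [hc]
        have hmo := pvHead_match c cs x xs hms 'o'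
        have hmy := pvHead_match c cs x xs hms 'y'
        constructor
        · rw [hsplit]
          simp only [pvSearchAge, pvChunkScan, hmo, hmy, Bool.true_and]
          by_cases hsec : pvIsD cs = true
          · by_cases ho : PySem.Chars.lowerChar c = 'o'
            · simp [ho, hsec]
            · by_cases hy : PySem.Chars.lowerChar c = 'y'
              · simp [hy, hsec]
              · simp [ho, hy, hsec, hcb, ih2, hms]
          · simp only [Bool.not_eq_true] at hsec
            simp [hsec, hcb, ih2, hms]
        · rw [hsplit]
          simp only [pvSearchAge, hcb]
          simp [ih2, hms]

lemma pvAlt_eq (label : String) :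
    color_annotator_age_alt label = pvAgeOut (pvSearchAge label.toList true) := by
  unfold color_annotator_age_alt pvAgeOut
  rcases pvSearchAge label.toList true with _ | g <;> simp

-- ===== VERDICT (by name: the statement is the Claim_ definition above) =====
theorem color_annotator_age_spec : Claim_equal_color_annotator_age := by
  intro label _
  unfold Spec_color_annotator_age
  rw [pvAlt_eq, (pvScan_eq label.toList).1]
  unfold color_annotator_age
  rw [pvSplitOn_eq, pvLoopA_map]
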